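-- pv_equiv track=rewrite | github.com/pypi-data/pypi-mirror-33 | packages/wlauto/wlauto-2.7.0.tar.gz/wlauto-2.7.0/wlauto/utils/trace_cmd.py | split_trace_event_line
-- ===== SOURCE A (Python) =====
-- def split_trace_event_line(line):
--     """
--     Split a trace-cmd event line into the preamble (containing the task, cpu id
--     and timestamp), the event name, and the event body. Each of these is
--     delimited by a ': ' (optionally followed by more whitespace), however ': '
--     may also appear in the body of the event and in the thread name. This
--     attempts to identify the correct split by ensureing the there is a '['
--     (used to mark the cpu id and not a valid character for a task name) in the
--     peramble.
--
--     """
--     parts = line.split(': ')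
--     if len(parts) <= 3:
--         return parts
--
--     preamble = parts.pop(0)
--     while '[' not in preamble:
--         preamble += ': ' + parts.pop(0)
--     event_name = parts.pop(0)
--     return (preamble, event_name, ': '.join(parts))
-- ===== SOURCE B (Python) =====
-- def split_trace_event_line(line):
--     parts = line.split(': ')
--     if len(parts) <= 3:
--         return parts
--     idx = 0
--     while '[' not in parts[idx]:
--         idx += 1
--     return (': '.join(parts[:idx + 1]), parts[idx + 1], ': '.join(parts[idx + 2:]))
-- ===== Notes on version B (the rewrite author's own statement) =====
-- stated objective: alternative
-- what changed: Instead of destructively popping parts while growing the preamble string, B scans for the first part containing '[' and slices: join of parts[:idx+1], parts[idx+1], join of parts[idx+2:] (B raises exactly where A raises).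
import Mathlib
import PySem

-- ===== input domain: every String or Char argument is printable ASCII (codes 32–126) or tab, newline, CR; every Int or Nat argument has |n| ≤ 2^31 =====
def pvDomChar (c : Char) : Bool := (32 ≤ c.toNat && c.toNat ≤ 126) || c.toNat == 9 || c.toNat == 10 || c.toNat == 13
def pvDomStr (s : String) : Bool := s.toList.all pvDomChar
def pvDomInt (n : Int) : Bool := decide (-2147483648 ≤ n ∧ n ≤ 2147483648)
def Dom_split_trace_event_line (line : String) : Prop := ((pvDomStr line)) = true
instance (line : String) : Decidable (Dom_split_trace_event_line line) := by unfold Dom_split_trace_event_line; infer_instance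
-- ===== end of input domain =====

-- B replaces A's destructive pop-and-grow loop by locating the first part containing '['
-- and slicing/joining around it (objective: alternative decomposition, same cost).

-- ===== PORT A =====
-- the separator ': ' as a char list
def pvSep : List Char := [':', ' ']

-- A's while loop: grow `pre` by popping from `rest` until '[' appears in `pre`.
-- On the [] case Python raises IndexError (pop from empty list); excluded by Pre_.
def pvLoopA : List Char → List (List Char) → List Char × List (List Char)
  | pre, [] => (pre, [])         -- if '[' ∉ pre, Python raises IndexError here; outside Pre_
  | pre, p :: rs =>
    if PySem.Chars.isIn ['['] pre then (pre, p :: rs)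
    else pvLoopA (pre ++ pvSep ++ p) rs

def split_trace_event_line (line : String) : List String :=
  let parts := PySem.Chars.splitOn line.toList pvSep
  if parts.length ≤ 3 then parts.map String.ofList
  else match parts with
    | [] => []                   -- unreachable: length > 3
    | p0 :: rest =>
      match pvLoopA p0 rest with
      | (_, []) => []            -- event_name pop raises IndexError; outside Pre_
      | (pre, name :: body) =>
        [String.ofList pre, String.ofList name, String.ofList (PySem.Chars.join pvSep body)]

-- ===== PORT B =====
-- B's index loop: first index whose part contains '['; none = IndexError, outside Pre_.
def pvLoopB : Nat → List (List Char) → Option Nat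
  | _, [] => none                -- IndexError in Python; outside Pre_
  | i, p :: rs => if PySem.Chars.isIn ['['] p then some i else pvLoopB (i + 1) rs

def split_trace_event_line_alt (line : String) : List String :=
  let parts := PySem.Chars.splitOn line.toList pvSep
  if parts.length ≤ 3 then parts.map String.ofList
  else match pvLoopB 0 parts with
    | none => []                 -- IndexError; outside Pre_
    | some i =>
      match PySem.List.pyGet? parts ((i : Int) + 1) with
      | none => []               -- IndexError; outside Pre_
      | some name =>
        [String.ofList (PySem.Chars.join pvSep (parts.take (i + 1))),
         String.ofList name,
         String.ofList (PySem.Chars.join pvSep (parts.drop (i + 2)))]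

-- ===== PRECONDITION & SPEC =====
-- Pre_ excludes exactly the inputs on which A raises IndexError (more than three ': '
-- parts and no part before the last one contains '['); B raises there too.
def Pre_split_trace_event_line (line : String) : Prop :=
  (PySem.Chars.splitOn line.toList pvSep).length ≤ 3 ∨
  ∃ p ∈ (PySem.Chars.splitOn line.toList pvSep).dropLast, PySem.Chars.isIn ['['] p = true
instance (line : String) : Decidable (Pre_split_trace_event_line line) := by
  unfold Pre_split_trace_event_line; infer_instance

def pvWitness_split_trace_event_line : String := "x [0]: ev: a: b"

def Spec_split_trace_event_line (line : String) (out : List String) : Prop := out = split_trace_event_line_alt line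
instance (line : String) (out : List String) : Decidable (Spec_split_trace_event_line line out) := by unfold Spec_split_trace_event_line; infer_instance

-- ===== CLAIM (what is proved, stated in full; the proofs are below) =====
def Claim_equal_split_trace_event_line : Prop := ∀ (line : String), Dom_split_trace_event_line line → Pre_split_trace_event_line line → Spec_split_trace_event_line line (split_trace_event_line line)

-- ===== LEMMAS AND PROOFS =====

-- '[' is a single character, so 'in' is list membership
theorem pvInfix_singleton (l : List Char) : ['['] <:+: l ↔ '[' ∈ l := by
  constructor
  · rintro ⟨a, b, h⟩; subst h; simp
  · intro h
    obtain ⟨a, b, rfl⟩ := List.mem_iff_append.mp h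
    exact ⟨a, b, by simp⟩

theorem pvIsIn_eq (l : List Char) : PySem.Chars.isIn ['['] l = l.contains '[' := by
  cases hc : l.contains '['
  · exact (PySem.Chars.isIn_eq_false_iff _ _).mpr (by rw [pvInfix_singleton]; simpa using hc)
  · exact (PySem.Chars.isIn_iff_infix _ _).mpr ((pvInfix_singleton _).mpr (by simpa using hc))

theorem pvSep_no_bracket : pvSep.contains '[' = false := by decide

theorem pvLoopB_shift (rest : List (List Char)) :
    ∀ i, pvLoopB i rest = (pvLoopB 0 rest).map (· + i) := by
  induction rest with
  | nil => intro i; simp [pvLoopB]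
  | cons p rs ih =>
    intro i
    by_cases hp : PySem.Chars.isIn ['['] p = true
    · simp [pvLoopB, hp]
    · simp only [pvLoopB, hp, Bool.false_eq_true, if_false, ih (i + 1), ih 1]
      cases pvLoopB 0 rs <;> simp; omega

theorem pvLoopB_lt {rest : List (List Char)} {j : Nat}
    (h : pvLoopB 0 rest = some j) : j < rest.length := by
  induction rest generalizing j with
  | nil => simp [pvLoopB] at h
  | cons p rs ih =>
    by_cases hp : PySem.Chars.isIn ['['] p = true
    · simp [pvLoopB, hp] at h; simp [← h]
    · simp only [pvLoopB, hp, Bool.false_eq_true, if_false, pvLoopB_shift rs 1] at h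
      cases hrs : pvLoopB 0 rs with
      | none => rw [hrs] at h; simp at h
      | some j' =>
        rw [hrs] at h
        simp only [Option.map_some, Option.some.injEq] at h
        have := ih hrs
        simp [← h]; omega

-- Pre_'s second disjunct forces pvLoopB to find an index with room for the event name
theorem pvLoopB_of_dropLast (l : List (List Char))
    (h : ∃ p ∈ l.dropLast, PySem.Chars.isIn ['['] p = true) :
    ∃ j, pvLoopB 0 l = some j ∧ j + 1 < l.length := by
  induction l with
  | nil => simp at h
  | cons p rs ih =>
    cases rs with
    | nil => simp at h
    | cons q rs' =>
      by_cases hp : PySem.Chars.isIn ['['] p = true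
      · exact ⟨0, by simp [pvLoopB, hp], by simp⟩
      · have h' : ∃ x ∈ (q :: rs').dropLast, PySem.Chars.isIn ['['] x = true := by
          rcases h with ⟨x, hx, hxi⟩
          rw [List.dropLast_cons_of_ne_nil (by simp)] at hx
          rcases List.mem_cons.mp hx with rfl | hx'
          · exact absurd hxi hp
          · exact ⟨x, hx', hxi⟩
        obtain ⟨j', hj', hlt⟩ := ih h'
        refine ⟨j' + 1, ?_, by simpa using Nat.succ_lt_succ hlt⟩
        rw [pvLoopB, if_neg (by simp [hp]), pvLoopB_shift _ 1, hj']; rfl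

-- A's loop, expressed through the first index pvLoopB finds
theorem pvLoopA_eq (rest : List (List Char)) :
    ∀ (pre : List Char), PySem.Chars.isIn ['['] pre = false →
    ∀ j, pvLoopB 0 rest = some j →
    pvLoopA pre rest =
      (pre ++ pvSep ++ PySem.Chars.join pvSep (rest.take (j + 1)), rest.drop (j + 1)) := by
  induction rest with
  | nil => intro pre _ j hj; simp [pvLoopB] at hj
  | cons p rs ih =>
    intro pre hpre j hj
    rw [pvLoopA, if_neg (by simp [hpre])]
    by_cases hp : PySem.Chars.isIn ['['] p = true
    · have hj0 : j = 0 := by simp [pvLoopB, hp] at hj; omega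
      subst hj0
      have hin : PySem.Chars.isIn ['['] (pre ++ pvSep ++ p) = true := by
        simp only [pvIsIn_eq] at hp ⊢
        simp_all
      cases rs with
      | nil => simp [pvLoopA, PySem.Chars.join_singleton]
      | cons r rs' => rw [pvLoopA, if_pos hin]; simp [PySem.Chars.join_singleton]
    · simp only [pvLoopB, hp, Bool.false_eq_true, if_false, pvLoopB_shift rs 1] at hj
      cases hrs : pvLoopB 0 rs with
      | none => rw [hrs] at hj; simp at hj
      | some j' =>
        rw [hrs] at hj
        simp only [Option.map_some, Option.some.injEq] at hj
        subst hj
        have hpre' : PySem.Chars.isIn ['['] (pre ++ pvSep ++ p) = false := by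
          simp only [pvIsIn_eq] at hpre hp ⊢
          have := pvSep_no_bracket
          simp_all
        rw [ih _ hpre' j' hrs]
        have hne : rs.take (j' + 1) ≠ [] := by
          have := pvLoopB_lt hrs
          cases rs <;> simp_all
        obtain ⟨a, l', htk⟩ := List.exists_cons_of_ne_nil hne
        refine Prod.ext ?_ (by simp)
        show pre ++ pvSep ++ p ++ pvSep ++ _ = pre ++ pvSep ++ PySem.Chars.join pvSep ((p :: rs).take (j' + 1 + 1))
        rw [List.take_succ_cons, htk, PySem.Chars.join_cons_cons]
        simp

-- ===== VERDICT (by name: the statement is the Claim_ definition above) =====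
theorem split_trace_event_line_spec : Claim_equal_split_trace_event_line := by
  intro line _ hpre
  unfold Spec_split_trace_event_line split_trace_event_line split_trace_event_line_alt
  unfold Pre_split_trace_event_line at hpre
  set parts := PySem.Chars.splitOn line.toList pvSep with hparts
  clear_value parts
  by_cases hlen : parts.length ≤ 3
  · simp [hlen]
  · simp only [hlen, if_false]
    rcases hpre with h3 | hex
    · exact absurd h3 hlen
    obtain ⟨j, hj, hjlt⟩ := pvLoopB_of_dropLast parts hex
    rw [hj]
    obtain ⟨p0, rest, rfl⟩ : ∃ p0 rest, parts = p0 :: rest := by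
      cases parts with
      | nil => simp at hlen
      | cons a b => exact ⟨a, b, rfl⟩
    dsimp only
    have hname : PySem.List.pyGet? (p0 :: rest) ((j : Int) + 1) = (p0 :: rest)[j + 1]? := by
      have h1 : ((j : Int) + 1) = ((j + 1 : Nat) : Int) := by push_cast; ring
      rw [h1, PySem.List.pyGet?_natCast]
    by_cases hp0 : PySem.Chars.isIn ['['] p0 = true
    · have hj0 : j = 0 := by simp [pvLoopB, hp0] at hj; omega
      subst hj0
      obtain ⟨n, bs, rfl⟩ : ∃ n bs, rest = n :: bs := by
        cases rest with
        | nil => simp at hjlt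
        | cons a b => exact ⟨a, b, rfl⟩
      rw [pvLoopA, if_pos hp0, hname]
      simp [PySem.Chars.join_singleton]
    · have hjB' : pvLoopB 0 rest = some (j - 1) ∧ 1 ≤ j := by
        simp only [pvLoopB, hp0, Bool.false_eq_true, if_false, pvLoopB_shift rest 1] at hj
        cases hrs : pvLoopB 0 rest with
        | none => rw [hrs] at hj; simp at hj
        | some j' =>
          rw [hrs] at hj
          simp only [Option.map_some, Option.some.injEq] at hj
          refine ⟨?_, by omega⟩
          congr 1; omega
      obtain ⟨hjB, hj1⟩ := hjB'
      rw [pvLoopA_eq rest p0 (Bool.not_eq_true _ ▸ hp0) _ hjB]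
      have hdl : j - 1 + 1 = j := by omega
      rw [hdl]
      have hdrop : j < rest.length := by simp at hjlt; omega
      obtain ⟨n, bs, hrd⟩ : ∃ n bs, rest.drop j = n :: bs := by
        cases h : rest.drop j with
        | nil => exact absurd (List.drop_eq_nil_iff.mp h) (by omega)
        | cons a b => exact ⟨a, b, rfl⟩
      rw [hrd, hname]
      have hget : (p0 :: rest)[j + 1]? = some n := by
        have h0 : rest[j]? = some n := by
          rw [← List.head?_drop, hrd]; rfl
        simpa using h0
      rw [hget]
      have hdropbs : rest.drop (j + 1) = bs := by
        have h1 : rest.drop (j + 1) = (rest.drop j).drop 1 := by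
          rw [List.drop_drop, Nat.add_comm]
        rw [h1, hrd]; rfl
      have htkne : rest.take j ≠ [] := by
        cases rest with
        | nil => simp at hdrop
        | cons a b => cases j with
          | zero => omega
          | succ k => simp
      obtain ⟨a, l', htk⟩ := List.exists_cons_of_ne_nil htkne
      have hjoin : PySem.Chars.join pvSep ((p0 :: rest).take (j + 1))
          = p0 ++ pvSep ++ PySem.Chars.join pvSep (rest.take j) := by
        rw [List.take_succ_cons, htk, PySem.Chars.join_cons_cons]
      have hdrop2 : (p0 :: rest).drop (j + 2) = bs := by
        simpa using hdropbs
      rw [hjoin, hdrop2]
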